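-- pv_equiv track=rewrite | github.com/phetzel/fast-next-personal-automation | backend/app/core/cover_letter_pdf.py | _format_cover_letter_paragraphs
-- ===== SOURCE A (Python) =====
-- def _format_cover_letter_paragraphs(text: str) -> list[str]:
--     """Convert plain text cover letter to list of paragraph strings.
--
--     Handles various input formats:
--     - Plain text with double newlines as paragraph separators
--     - Text that already has paragraph structure
--     - Removes any greeting/closing that might be in the AI output
--
--     The AI should generate body-only content, but this provides fallback
--     filtering in case greetings/closings slip through.
--     """
--     if not text:
--         return []
--
--     lines = text.strip().split("\n")
--
--     # Group consecutive non-empty lines into paragraphs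
--     paragraphs = []
--     current_paragraph = []
--
--     # Patterns to filter out (greetings and closings)
--     skip_prefixes = (
--         "dear ",
--         "to whom",
--         "hi ",
--         "hello ",
--         "sincerely",
--         "best regards",
--         "best,",
--         "regards,",
--         "thank you,",
--         "thanks,",
--         "yours truly",
--         "yours sincerely",
--         "warm regards",
--         "warmly,",
--         "respectfully",
--         "with appreciation",
--         "kind regards",
--         "cordially",
--     )
--
--     for line in lines:
--         line = line.strip()
--         if line:
--             lower_line = line.lower()
--
--             # Skip greetings and closings
--             if lower_line.startswith(skip_prefixes):
--                 continue
--
--             # Skip lines that are just a name (likely signature)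
--             # Heuristic: short line with no punctuation except maybe period
--             if len(line) < 40 and not any(c in line for c in ",;:!?"):
--                 words = line.split()
--                 if len(words) <= 3 and all(w[0].isupper() for w in words if w):
--                     # Likely just a name, skip it
--                     continue
--
--             current_paragraph.append(line)
--         else:
--             if current_paragraph:
--                 paragraphs.append(" ".join(current_paragraph))
--                 current_paragraph = []
--
--     # Don't forget the last paragraph
--     if current_paragraph:
--         paragraphs.append(" ".join(current_paragraph))
--
--     return [p for p in paragraphs if p]
-- ===== SOURCE B (Python) =====
-- _SKIP_PREFIXES = (
--     "dear ", "to whom", "hi ", "hello ", "sincerely", "best regards",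
--     "best,", "regards,", "thank you,", "thanks,", "yours truly",
--     "yours sincerely", "warm regards", "warmly,", "respectfully",
--     "with appreciation", "kind regards", "cordially",
-- )
--
--
-- def _skip_line(line: str) -> bool:
--     """True if a stripped, non-empty line is a greeting/closing or a bare name."""
--     if line.lower().startswith(_SKIP_PREFIXES):
--         return True
--     if len(line) < 40 and not any(c in line for c in ",;:!?"):
--         words = line.split()
--         if len(words) <= 3 and all(w[0].isupper() for w in words if w):
--             return True
--     return False
--
--
-- def _blocks(lines: list[str]) -> list[list[str]]:
--     """Segment into maximal runs of consecutive non-empty lines."""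
--     blocks = []
--     i, n = 0, len(lines)
--     while i < n:
--         if not lines[i]:
--             i += 1
--         else:
--             j = i
--             while j < n and lines[j]:
--                 j += 1
--             blocks.append(lines[i:j])
--             i = j
--     return blocks
--
--
-- def _format_cover_letter_paragraphs(text: str) -> list[str]:
--     lines = [ln.strip() for ln in text.strip().split("\n")] if text else []
--     kept_blocks = [[ln for ln in b if not _skip_line(ln)] for b in _blocks(lines)]
--     return [" ".join(b) for b in kept_blocks if b]
-- ===== Notes on version B (the rewrite author's own statement) =====
-- stated objective: alternative
-- what changed: Replaced A's single interleaved accumulator loop (strip/filter/group/flush in one pass with paragraph and current-line state) by a segment-first decomposition: strip all lines, segment them into maximal runs of consecutive non-empty lines, then independently filter each block with the greeting/name heuristic and join the survivors, keeping non-empty blocks.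
import Mathlib
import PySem

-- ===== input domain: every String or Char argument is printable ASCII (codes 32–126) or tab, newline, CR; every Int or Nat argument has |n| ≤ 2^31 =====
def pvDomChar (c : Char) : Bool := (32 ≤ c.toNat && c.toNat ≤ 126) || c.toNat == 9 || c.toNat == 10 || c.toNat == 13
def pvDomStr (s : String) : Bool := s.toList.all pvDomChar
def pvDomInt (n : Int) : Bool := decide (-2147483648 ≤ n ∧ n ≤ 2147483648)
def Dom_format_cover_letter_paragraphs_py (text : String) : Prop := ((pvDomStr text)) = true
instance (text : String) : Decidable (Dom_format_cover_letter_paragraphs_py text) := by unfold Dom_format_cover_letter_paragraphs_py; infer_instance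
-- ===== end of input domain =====

-- B re-decomposes A's single interleaved accumulator loop into segment-first passes
-- (split into maximal non-blank runs, then filter/join each block); same result, no speed claim.

-- shared constant: the greeting/closing prefix tuple, identical in both Pythons
def pvSkipPrefixes : List String :=
  ["dear ", "to whom", "hi ", "hello ", "sincerely", "best regards",
   "best,", "regards,", "thank you,", "thanks,", "yours truly",
   "yours sincerely", "warm regards", "warmly,", "respectfully",
   "with appreciation", "kind regards", "cordially"]

-- shared helper: the per-line skip heuristic, identical code in both Pythons
-- (A inline in its loop, B as `_skip_line`)
def pvSkipLine (line : String) : Bool :=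
  (pvSkipPrefixes.any (fun p => PySem.Str.startswith (PySem.Str.lower line) p))
  ||
  ((decide (PySem.Str.len line < 40)
      && !((",;:!?".toList).any (fun c => PySem.Str.isIn (String.ofList [c]) line)))
    &&
    (let words := PySem.Str.split₀ line
     decide (words.length ≤ 3)
       && words.all (fun w => match w.toList with
           | [] => true            -- `for w in words if w`: empty words pass vacuously
           | c :: _ => PySem.Chars.isupper c)))

-- text.split("\n"): sep ≠ "" so PySem.Str.split? is always `some`; getD is never the default
def pvSplitNL (s : String) : List String := (PySem.Str.split? s "\n").getD []

-- ===== PORT A =====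
def format_cover_letter_paragraphs_py (text : String) : List String :=
  if text = "" then []
  else
    let lines := pvSplitNL (PySem.Str.strip text)
    let st := lines.foldl
      (fun (acc : List String × List String) rawline =>
        let line := PySem.Str.strip rawline
        if line ≠ "" then
          if pvSkipLine line then acc
          else (acc.1, acc.2 ++ [line])
        else
          if acc.2 ≠ [] then (acc.1 ++ [PySem.Str.join " " acc.2], []) else acc)
      ([], [])
    let paragraphs := if st.2 ≠ [] then st.1 ++ [PySem.Str.join " " st.2] else st.1
    paragraphs.filter (fun p => !(p == ""))

-- ===== PORT B =====
-- B helper: maximal runs of consecutive non-empty lines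
def pvBlocks : List String → List (List String)
  | [] => []
  | l :: rest =>
    if l = "" then pvBlocks rest
    else (l :: rest.takeWhile (fun s => !(s == ""))) ::
         pvBlocks (rest.dropWhile (fun s => !(s == "")))
termination_by ls => ls.length
decreasing_by
  · simp
  · have := List.length_dropWhile_le (fun s : String => !(s == "")) rest
    simp; omega

def format_cover_letter_paragraphs_py_alt (text : String) : List String :=
  let lines := if text = "" then []
               else (pvSplitNL (PySem.Str.strip text)).map PySem.Str.strip
  let keptBlocks := (pvBlocks lines).map (fun b => b.filter (fun ln => !pvSkipLine ln))
  (keptBlocks.filter (fun b => !(b == []))).map (fun b => PySem.Str.join " " b)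

-- ===== PRECONDITION & SPEC =====
def Spec_format_cover_letter_paragraphs_py (text : String) (out : List String) : Prop := out = format_cover_letter_paragraphs_py_alt text
instance (text : String) (out : List String) : Decidable (Spec_format_cover_letter_paragraphs_py text out) := by unfold Spec_format_cover_letter_paragraphs_py; infer_instance

-- ===== CLAIM (what is proved, stated in full; the proofs are below) =====
def Claim_equal_format_cover_letter_paragraphs_py : Prop := ∀ (text : String), Dom_format_cover_letter_paragraphs_py text → Spec_format_cover_letter_paragraphs_py text (format_cover_letter_paragraphs_py text)

-- ===== LEMMAS AND PROOFS =====

-- proof-side names for A's loop body and post-processing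
def pvStepA (acc : List String × List String) (line : String) : List String × List String :=
  if line ≠ "" then
    if pvSkipLine line then acc else (acc.1, acc.2 ++ [line])
  else
    if acc.2 ≠ [] then (acc.1 ++ [PySem.Str.join " " acc.2], []) else acc

def pvFinish (st : List String × List String) : List String :=
  if st.2 ≠ [] then st.1 ++ [PySem.Str.join " " st.2] else st.1

-- the common recursive characterisation of the paragraph computation on stripped lines
def pvCore : List String → List String → List String
  | cur, [] => if cur ≠ [] then [PySem.Str.join " " cur] else []
  | cur, l :: ls =>
    if l ≠ "" then
      if pvSkipLine l then pvCore cur ls else pvCore (cur ++ [l]) ls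
    else
      if cur ≠ [] then PySem.Str.join " " cur :: pvCore [] ls else pvCore [] ls

theorem pvCore_nil (cur : List String) :
    pvCore cur [] = if cur ≠ [] then [PySem.Str.join " " cur] else [] := rfl

theorem pvCore_cons (cur : List String) (l : String) (ls : List String) :
    pvCore cur (l :: ls) =
      if l ≠ "" then
        if pvSkipLine l then pvCore cur ls else pvCore (cur ++ [l]) ls
      else
        if cur ≠ [] then PySem.Str.join " " cur :: pvCore [] ls else pvCore [] ls := rfl

theorem pvBlocks_cons (l : String) (rest : List String) :
    pvBlocks (l :: rest) = if l = "" then pvBlocks rest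
      else (l :: rest.takeWhile (fun s => !(s == ""))) ::
           pvBlocks (rest.dropWhile (fun s => !(s == ""))) := by
  conv_lhs => rw [pvBlocks.eq_def]

theorem pvJoin_ne_empty (x : String) (rest : List String) (hx : x ≠ "") :
    PySem.Str.join " " (x :: rest) ≠ "" := by
  intro h
  have h' := congrArg String.toList h
  rw [PySem.Str.toList_join] at h'
  cases rest with
  | nil =>
    rw [List.map_cons, List.map_nil, PySem.Chars.join_singleton] at h'
    exact hx (String.toList_eq_nil_iff.mp (by simpa using h'))
  | cons y ys =>
    rw [List.map_cons, List.map_cons, PySem.Chars.join_cons_cons] at h'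
    simp at h'

theorem pvCore_nonempty_mem : ∀ (ls cur : List String), (∀ x ∈ cur, x ≠ "") →
    ∀ p ∈ pvCore cur ls, p ≠ "" := by
  intro ls
  induction ls with
  | nil =>
    intro cur hcur p hp
    rw [pvCore_nil] at hp
    split at hp
    · rename_i hne
      cases cur with
      | nil => simp at hne
      | cons x rest =>
        simp only [List.mem_singleton] at hp
        exact hp ▸ pvJoin_ne_empty x rest (hcur x (by simp))
    · simp at hp
  | cons l ls ih =>
    intro cur hcur p hp
    rw [pvCore_cons] at hp
    split at hp
    · rename_i hl
      split at hp
      · exact ih cur hcur p hp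
      · refine ih (cur ++ [l]) ?_ p hp
        intro x hx
        rcases List.mem_append.mp hx with h | h
        · exact hcur x h
        · simp only [List.mem_singleton] at h; exact h ▸ hl
    · split at hp
      · rename_i hcurne
        rcases List.mem_cons.mp hp with h | h
        · cases cur with
          | nil => simp at hcurne
          | cons x rest => exact h ▸ pvJoin_ne_empty x rest (hcur x (by simp))
        · exact ih [] (by simp) p h
      · exact ih [] (by simp) p hp

-- A's fold, post-processed, equals pvCore
theorem pvFoldA_eq_core : ∀ (ls paras cur : List String),
    pvFinish (ls.foldl pvStepA (paras, cur)) = paras ++ pvCore cur ls := by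
  intro ls
  induction ls with
  | nil =>
    intro paras cur
    rw [List.foldl_nil, pvCore_nil]
    unfold pvFinish
    split <;> simp
  | cons l ls ih =>
    intro paras cur
    rw [List.foldl_cons, pvCore_cons]
    by_cases hl : l = ""
    · subst hl
      rw [if_neg (by simp)]
      by_cases hc : cur = []
      · rw [show pvStepA (paras, cur) "" = (paras, cur) from by simp [pvStepA, hc],
            if_neg (by simp [hc]), hc]
        exact ih paras []
      · rw [show pvStepA (paras, cur) ""
              = (paras ++ [PySem.Str.join " " cur], []) from by simp [pvStepA, hc],
            if_pos hc, ih (paras ++ [PySem.Str.join " " cur]) []]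
        simp
    · rw [if_pos (by simpa using hl)]
      by_cases hs : pvSkipLine l
      · rw [show pvStepA (paras, cur) l = (paras, cur) from by simp [pvStepA, hl, hs],
            if_pos hs]
        exact ih paras cur
      · rw [show pvStepA (paras, cur) l = (paras, cur ++ [l]) from by
              simp [pvStepA, hl, hs],
            if_neg (by simp [hs])]
        exact ih paras (cur ++ [l])

theorem pvCore_append_block : ∀ (b : List String), (∀ x ∈ b, x ≠ "") →
    ∀ (cur ls : List String),
    pvCore cur (b ++ ls) = pvCore (cur ++ b.filter (fun x => !pvSkipLine x)) ls := by
  intro b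
  induction b with
  | nil => intro _ cur ls; simp
  | cons x b ih =>
    intro hb cur ls
    have hx : x ≠ "" := hb x (by simp)
    have hb' : ∀ y ∈ b, y ≠ "" := fun y hy => hb y (by simp [hy])
    rw [List.cons_append, pvCore_cons, if_pos (by simpa using hx), List.filter_cons]
    by_cases hs : pvSkipLine x
    · rw [if_pos hs, if_neg (by simp [hs]), ih hb' cur ls]
    · rw [if_neg (by simp [hs]), if_pos (by simp [hs]), ih hb' (cur ++ [x]) ls]
      simp

theorem pvCore_blank_head (kb ls : List String) (h : ls = [] ∨ ∃ ls', ls = "" :: ls') :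
    pvCore kb ls = (if kb ≠ [] then [PySem.Str.join " " kb] else []) ++ pvCore [] ls := by
  rcases h with h | ⟨ls', h⟩ <;> subst h
  · rw [pvCore_nil, pvCore_nil]
    split <;> simp
  · by_cases hkb : kb = []
    · simp [pvCore_cons, hkb]
    · simp [pvCore_cons, hkb]

-- B's segment/filter/join equals pvCore
theorem pvB_eq_core : ∀ (ls : List String),
    (((pvBlocks ls).map (fun b => b.filter (fun ln => !pvSkipLine ln))).filter
        (fun b => !(b == []))).map (fun b => PySem.Str.join " " b)
    = pvCore [] ls := by
  intro ls
  induction ls using pvBlocks.induct with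
  | case1 => simp [pvBlocks, pvCore_nil]
  | case2 rest ih =>
    rw [pvBlocks_cons, if_pos rfl, pvCore_cons, if_neg (by simp), if_neg (by simp)]
    exact ih
  | case3 l rest hl ih =>
    rw [pvBlocks_cons, if_neg hl]
    have hblock : ∀ x ∈ l :: rest.takeWhile (fun s : String => !(s == "")), x ≠ "" := by
      intro x hx
      rcases List.mem_cons.mp hx with h | h
      · exact h ▸ hl
      · simpa using List.mem_takeWhile_imp h
    have hsplit : l :: rest = (l :: rest.takeWhile (fun s : String => !(s == ""))) ++
        rest.dropWhile (fun s : String => !(s == "")) := by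
      simp [List.takeWhile_append_dropWhile]
    have hdrop : rest.dropWhile (fun s : String => !(s == "")) = []
        ∨ ∃ ls', rest.dropWhile (fun s : String => !(s == "")) = "" :: ls' := by
      cases hd : rest.dropWhile (fun s : String => !(s == "")) with
      | nil => exact Or.inl rfl
      | cons y ys =>
        right
        have hhead := List.head?_dropWhile_not (fun s : String => !(s == "")) rest
        rw [hd] at hhead
        simp only [List.head?_cons] at hhead
        simp at hhead
        exact ⟨ys, by rw [hhead] at hd ⊢⟩
    conv_rhs => rw [hsplit]
    rw [pvCore_append_block _ hblock [] _, List.nil_append,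
        pvCore_blank_head _ _ hdrop, ← ih]
    rw [List.map_cons, List.filter_cons]
    by_cases hkb : (l :: rest.takeWhile (fun s : String => !(s == ""))).filter
        (fun ln => !pvSkipLine ln) = []
    · rw [hkb, if_neg (by simp), if_neg (by simp), List.nil_append]
    · rw [if_pos (by simp [hkb]), if_pos hkb, List.map_cons, List.singleton_append]

-- ===== VERDICT (by name: the statement is the Claim_ definition above) =====
theorem format_cover_letter_paragraphs_py_spec : Claim_equal_format_cover_letter_paragraphs_py := by
  intro text _
  unfold Spec_format_cover_letter_paragraphs_py
  unfold format_cover_letter_paragraphs_py format_cover_letter_paragraphs_py_alt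
  by_cases ht : text = ""
  · rw [if_pos ht, if_pos ht]
    show ([] : List String) = _
    simp [pvBlocks]
  · rw [if_neg ht, if_neg ht]
    show (pvFinish ((pvSplitNL (PySem.Str.strip text)).foldl
        (fun acc raw => pvStepA acc (PySem.Str.strip raw)) ([], []))).filter
        (fun p => !(p == ""))
      = _
    rw [show ((pvSplitNL (PySem.Str.strip text)).foldl
          (fun acc raw => pvStepA acc (PySem.Str.strip raw)) ([], []))
        = (((pvSplitNL (PySem.Str.strip text)).map PySem.Str.strip).foldl
            pvStepA ([], [])) from List.foldl_map.symm]
    rw [pvFoldA_eq_core ((pvSplitNL (PySem.Str.strip text)).map PySem.Str.strip) [] [],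
        List.nil_append]
    rw [List.filter_eq_self.mpr
        (fun p hp => by
          have := pvCore_nonempty_mem _ [] (by simp) p hp
          simp [this])]
    exact (pvB_eq_core _).symm
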